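-- pv_equiv track=rewrite | github.com/maybe-william/holbertonschool-higher_level_programming | 0x07-python-test_driven_development/5-text_indentation.py | rmchr
-- ===== SOURCE A (Python) =====
-- def rmchr(txt, char):
--     """ Remove char from txt and add \n\n """
--     tempstr = txt
--     ret = ""
--     tup = tempstr.partition(char)
--     while tup[1] != "":
--         ret = ret + tup[0].rstrip("\t\v\f ") + tup[1] + "\n\n"
--         tempstr = tup[2].lstrip("\t\v\f ")
--         tup = tempstr.partition(char)
--     ret = ret + tempstr
--     return ret
-- ===== SOURCE B (Python) =====
-- def rmchr(txt, char):
--     """ Remove char from txt and add \n\n """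
--     parts = txt.split(char)
--     if len(parts) == 1:
--         return txt
--     ws = "\t\v\f "
--     trimmed = [parts[0].rstrip(ws)]
--     trimmed += [p.strip(ws) for p in parts[1:-1]]
--     trimmed.append(parts[-1].lstrip(ws))
--     return (char + "\n\n").join(trimmed)
-- ===== Notes on version B (the rewrite author's own statement) =====
-- stated objective: idiomatic
-- what changed: B replaces A's repeated partition/while loop with string accumulation by a single txt.split(char) followed by position-dependent trimming of the segments and one join.
-- outside the precondition, e.g. on rmchr('a  b', ' '): A returns 'a \n\nb', B returns 'a \n\n \n\nb'
import Mathlib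
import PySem

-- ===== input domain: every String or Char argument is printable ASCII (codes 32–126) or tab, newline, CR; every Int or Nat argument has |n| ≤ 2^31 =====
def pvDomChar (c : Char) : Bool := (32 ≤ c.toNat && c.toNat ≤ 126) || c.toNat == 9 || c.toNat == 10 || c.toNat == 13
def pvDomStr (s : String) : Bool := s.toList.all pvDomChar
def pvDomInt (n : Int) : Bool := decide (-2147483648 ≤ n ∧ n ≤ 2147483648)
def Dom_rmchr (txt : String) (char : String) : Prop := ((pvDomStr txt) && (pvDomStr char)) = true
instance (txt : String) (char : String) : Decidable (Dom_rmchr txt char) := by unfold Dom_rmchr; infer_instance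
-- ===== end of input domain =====

-- B replaces A's repeated-partition while loop by one split, per-position trimming and one join (idiomatic; same results on Pre_).


-- ===== PORT A =====
-- the strip set "\t\v\f " used by both Pythons
def pvWS : List Char := ['\t', '\x0B', '\x0C', ' ']
-- s.lstrip("\t\v\f ") / s.rstrip("\t\v\f ") on code points (exact)
def pvLstrip (l : List Char) : List Char := l.dropWhile (pvWS.contains ·)
def pvRstrip (l : List Char) : List Char := (l.reverse.dropWhile (pvWS.contains ·)).reverse

-- hand port of str.partition (PySem has no partition primitive); exact for sep ≠ ""
-- (Python raises ValueError on sep = "", which Pre_ excludes)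
def pvPart (sep : List Char) : List Char → List Char × List Char × List Char
  | [] => ([], [], [])
  | c :: rest =>
    if sep.isPrefixOf (c :: rest) then ([], sep, (c :: rest).drop sep.length)
    else
      let t := pvPart sep rest
      (c :: t.1, t.2.1, t.2.2)

theorem pvPart_lt (sep l : List Char) (h : (pvPart sep l).2.1 ≠ []) :
    (pvPart sep l).2.2.length < l.length := by
  induction l with
  | nil => simp [pvPart] at h
  | cons c rest ih =>
    by_cases hp : sep.isPrefixOf (c :: rest)
    · have hle : sep.length ≤ (c :: rest).length :=
        (List.isPrefixOf_iff_prefix.mp hp).length_le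
      have hne : sep ≠ [] := by
        intro h0; rw [h0] at h; simp [pvPart, hp] at h
      have : 1 ≤ sep.length := by
        cases sep with
        | nil => exact absurd rfl hne
        | cons _ _ => simp
      simp [pvPart, hp]
      omega
    · simp only [pvPart, if_neg hp] at h ⊢
      exact Nat.lt_succ_of_lt (ih h)

-- the while loop of A: state (ret, tempstr)
def rmchrGo (sep ret temp : List Char) : List Char :=
  let t := pvPart sep temp
  if h : t.2.1 ≠ [] then
    rmchrGo sep (ret ++ pvRstrip t.1 ++ t.2.1 ++ ['\n', '\n']) (pvLstrip t.2.2)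
  else ret ++ temp
termination_by temp.length
decreasing_by
  calc (pvLstrip (pvPart sep temp).2.2).length
      ≤ (pvPart sep temp).2.2.length := List.length_dropWhile_le _ _
    _ < temp.length := pvPart_lt sep temp h

def rmchr (txt : String) (char : String) : String :=
  String.ofList (rmchrGo char.toList [] txt.toList)

-- ===== PORT B =====
-- p.strip("\t\v\f ") (exact: strip = lstrip then rstrip)
def pvStrip (l : List Char) : List Char := pvRstrip (pvLstrip l)

def rmchr_alt (txt : String) (char : String) : String :=
  match PySem.Chars.splitOn txt.toList char.toList with
  | p :: q :: rest =>
    -- rstrip the first segment, strip the interior ones, lstrip the last; join with char + "\n\n"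
    String.ofList (PySem.Chars.join (char.toList ++ ['\n', '\n'])
      (pvRstrip p :: ((q :: rest).dropLast.map pvStrip ++ [pvLstrip ((q :: rest).getLastD [])])))
  | _ => txt   -- len(parts) == 1: no delimiter, txt returned unchanged (splitOn never returns [])

-- ===== PRECONDITION & SPEC =====
-- Pre_ excludes char = "" (both Pythons raise ValueError there) and char whose FIRST character is one of
-- the trimmed set "\t\v\f ": there A's lstrip-before-repartition can consume delimiter occurrences, an
-- unspecified corner where A's collapsed and B's uncollapsed results are both defensible.
def Pre_rmchr (txt : String) (char : String) : Prop :=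
  char.toList ≠ [] ∧ char.toList.headI ∉ pvWS
instance (txt : String) (char : String) : Decidable (Pre_rmchr txt char) := by
  unfold Pre_rmchr; infer_instance

def pvWitness_rmchr : String × String := ("  Hi. There.\tBye", ".")

def Spec_rmchr (txt : String) (char : String) (out : String) : Prop := out = rmchr_alt txt char
instance (txt : String) (char : String) (out : String) : Decidable (Spec_rmchr txt char out) := by
  unfold Spec_rmchr; infer_instance

-- ===== CLAIM (what is proved, stated in full; the proofs are below) =====
def Claim_equal_rmchr : Prop := ∀ (txt : String) (char : String), Dom_rmchr txt char → Pre_rmchr txt char → Spec_rmchr txt char (rmchr txt char)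

-- ===== LEMMAS AND PROOFS =====

-- reference form of str.split(sep) for sep ≠ "": head recursion on the text
def splitRef (sep : List Char) (l : List Char) : List (List Char) :=
  match l with
  | [] => [[]]
  | c :: rest =>
    if h : sep.isPrefixOf (c :: rest) ∧ sep ≠ [] then
      [] :: splitRef sep ((c :: rest).drop sep.length)
    else
      match splitRef sep rest with
      | [] => [c :: rest]
      | p :: ps => (c :: p) :: ps
termination_by l.length
decreasing_by
  · have hle : sep.length ≤ (c :: rest).length :=
      (List.isPrefixOf_iff_prefix.mp h.1).length_le
    have : 1 ≤ sep.length := by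
      cases sep with
      | nil => exact absurd rfl h.2
      | cons _ _ => simp
    simp; omega
  · simp

theorem splitRef_nil (sep : List Char) : splitRef sep [] = [[]] := by
  rw [splitRef]

theorem splitRef_cons_pos (sep : List Char) (c : Char) (rest : List Char)
    (hp : sep.isPrefixOf (c :: rest)) (hn : sep ≠ []) :
    splitRef sep (c :: rest) = [] :: splitRef sep ((c :: rest).drop sep.length) := by
  rw [splitRef]
  simp [hp, hn]

theorem splitRef_cons_neg (sep : List Char) (c : Char) (rest : List Char)
    (hp : ¬ (sep.isPrefixOf (c :: rest) = true ∧ sep ≠ [])) :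
    splitRef sep (c :: rest) =
      match splitRef sep rest with
      | [] => [c :: rest]
      | p :: ps => (c :: p) :: ps := by
  rw [splitRef]
  simp only [dif_neg hp]

theorem splitRef_ne_nil (sep l : List Char) : splitRef sep l ≠ [] := by
  cases l with
  | nil => simp [splitRef_nil]
  | cons c rest =>
    by_cases hg : sep.isPrefixOf (c :: rest) = true ∧ sep ≠ []
    · rw [splitRef_cons_pos sep c rest hg.1 hg.2]; simp
    · rw [splitRef_cons_neg sep c rest hg]
      cases splitRef sep rest <;> simp

def prepHead (x : List Char) : List (List Char) → List (List Char)
  | [] => [x]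
  | p :: ps => (x ++ p) :: ps

theorem go_spec (sep : List Char) (hs : sep ≠ []) :
    ∀ fuel l cur acc, l.length < fuel →
      PySem.Chars.splitOn.go sep fuel l cur acc =
        acc.reverse ++ prepHead cur.reverse (splitRef sep l) := by
  intro fuel
  induction fuel with
  | zero => intro l cur acc h; omega
  | succ fuel ih =>
    intro l cur acc h
    cases l with
    | nil =>
      simp [PySem.Chars.splitOn.go, splitRef_nil, prepHead]
    | cons c rest =>
      by_cases hp : sep.isPrefixOf (c :: rest)
      · have h1 : 1 ≤ sep.length := by
          cases sep with
          | nil => exact absurd rfl hs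
          | cons _ _ => simp
        have hle : sep.length ≤ (c :: rest).length :=
          (List.isPrefixOf_iff_prefix.mp hp).length_le
        have hlen : ((c :: rest).drop sep.length).length < fuel := by
          simp at h ⊢; omega
        rw [PySem.Chars.splitOn.go]
        simp only [hp, if_true]
        rw [ih _ _ _ hlen]
        rw [splitRef_cons_pos sep c rest hp hs]
        obtain ⟨p, ps, hsp⟩ :
            ∃ p ps, splitRef sep ((c :: rest).drop sep.length) = p :: ps := by
          cases hx : splitRef sep ((c :: rest).drop sep.length) with
          | nil => exact absurd hx (splitRef_ne_nil _ _)
          | cons p ps => exact ⟨p, ps, rfl⟩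
        rw [hsp]
        simp [prepHead]
      · have hlen : rest.length < fuel := by simp at h; omega
        rw [PySem.Chars.splitOn.go]
        simp only [hp, if_false]
        rw [ih _ _ _ hlen]
        rw [splitRef_cons_neg sep c rest (by simp [hp])]
        obtain ⟨p, ps, hsp⟩ : ∃ p ps, splitRef sep rest = p :: ps := by
          cases hx : splitRef sep rest with
          | nil => exact absurd hx (splitRef_ne_nil _ _)
          | cons p ps => exact ⟨p, ps, rfl⟩
        rw [hsp]
        simp [prepHead]

theorem splitOn_eq (sep l : List Char) (hs : sep ≠ []) :
    PySem.Chars.splitOn l sep = splitRef sep l := by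
  unfold PySem.Chars.splitOn
  rw [go_spec sep hs _ _ _ _ (by omega)]
  obtain ⟨p, ps, hsp⟩ : ∃ p ps, splitRef sep l = p :: ps := by
    cases hx : splitRef sep l with
    | nil => exact absurd hx (splitRef_ne_nil _ _)
    | cons p ps => exact ⟨p, ps, rfl⟩
  rw [hsp]; simp [prepHead]

theorem pvPart_mid (sep l : List Char) :
    (pvPart sep l).2.1 = [] ∨ (pvPart sep l).2.1 = sep := by
  induction l with
  | nil => simp [pvPart]
  | cons c rest ih =>
    by_cases hp : sep.isPrefixOf (c :: rest)
    · simp [pvPart, hp]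
    · simpa [pvPart, hp] using ih

theorem splitRef_of_mid_nil (sep l : List Char) (hs : sep ≠ [])
    (h : (pvPart sep l).2.1 = []) : splitRef sep l = [l] := by
  induction l with
  | nil => simp [splitRef_nil]
  | cons c rest ih =>
    by_cases hp : sep.isPrefixOf (c :: rest)
    · rw [pvPart] at h; simp [hp] at h; exact absurd h hs
    · simp only [pvPart, if_neg hp] at h
      rw [splitRef_cons_neg sep c rest (by simp [hp])]
      rw [ih h]

theorem splitRef_of_mid_ne (sep l : List Char) (hs : sep ≠ [])
    (h : (pvPart sep l).2.1 ≠ []) :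
    splitRef sep l = (pvPart sep l).1 :: splitRef sep (pvPart sep l).2.2 := by
  induction l with
  | nil => simp [pvPart] at h
  | cons c rest ih =>
    by_cases hp : sep.isPrefixOf (c :: rest)
    · rw [splitRef_cons_pos sep c rest hp hs]
      simp [pvPart, hp]
    · simp only [pvPart, if_neg hp] at h ⊢
      rw [splitRef_cons_neg sep c rest (by simp [hp])]
      rw [ih h]

theorem splitRef_single (sep l p : List Char) (hs : sep ≠ [])
    (h : splitRef sep l = [p]) : p = l := by
  rcases pvPart_mid sep l with hm | hm
  · rw [splitRef_of_mid_nil sep l hs hm] at h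
    simpa using h.symm
  · have hne : (pvPart sep l).2.1 ≠ [] := by rw [hm]; exact hs
    rw [splitRef_of_mid_ne sep l hs hne] at h
    have := splitRef_ne_nil sep (pvPart sep l).2.2
    simp at h
    exact absurd h.2 this

theorem lstrip_cons_mem (c : Char) (l : List Char) (hc : c ∈ pvWS) :
    pvLstrip (c :: l) = pvLstrip l := by
  simp [pvLstrip, List.dropWhile_cons, hc]

theorem lstrip_cons_not_mem (c : Char) (l : List Char) (hc : c ∉ pvWS) :
    pvLstrip (c :: l) = c :: l := by
  simp [pvLstrip, List.dropWhile_cons, hc]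

theorem splitRef_lstrip (sep : List Char) (hs : sep ≠ []) (hw : sep.headI ∉ pvWS) :
    ∀ l q qs, splitRef sep l = q :: qs →
      splitRef sep (pvLstrip l) = pvLstrip q :: qs := by
  intro l
  induction l with
  | nil =>
    intro q qs h
    rw [splitRef_nil] at h
    injection h with h1 h2
    subst h1; subst h2
    simp [pvLstrip, splitRef_nil]
  | cons c rest ih =>
    intro q qs h
    by_cases hc : c ∈ pvWS
    · have hp : ¬ sep.isPrefixOf (c :: rest) = true := by
        intro hp
        cases sep with
        | nil => exact hs rfl
        | cons s0 stail =>
          obtain ⟨t, ht⟩ := List.isPrefixOf_iff_prefix.mp hp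
          have hs0 : s0 = c := by simpa using congrArg (·.head?) ht
          exact hw (by simpa [hs0] using hc)
      rw [splitRef_cons_neg sep c rest (by simp [hp])] at h
      obtain ⟨p, ps, hsp⟩ : ∃ p ps, splitRef sep rest = p :: ps := by
        cases hx : splitRef sep rest with
        | nil => exact absurd hx (splitRef_ne_nil _ _)
        | cons p ps => exact ⟨p, ps, rfl⟩
      rw [hsp] at h
      simp only [List.cons.injEq] at h
      obtain ⟨hq, hqs⟩ := h
      rw [lstrip_cons_mem c rest hc]
      rw [← hq, lstrip_cons_mem c p hc]
      exact ih p qs (by rw [hsp, hqs])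
    · rw [lstrip_cons_not_mem c rest hc, h]
      have hq : pvLstrip q = q := by
        by_cases hg : sep.isPrefixOf (c :: rest) = true ∧ sep ≠ []
        · rw [splitRef_cons_pos sep c rest hg.1 hg.2] at h
          injection h with h1 _
          simp [← h1, pvLstrip]
        · rw [splitRef_cons_neg sep c rest hg] at h
          obtain ⟨p, ps, hsp⟩ : ∃ p ps, splitRef sep rest = p :: ps := by
            cases hx : splitRef sep rest with
            | nil => exact absurd hx (splitRef_ne_nil _ _)
            | cons p ps => exact ⟨p, ps, rfl⟩
          rw [hsp] at h
          simp only [List.cons.injEq] at h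
          rw [← h.1]
          exact lstrip_cons_not_mem c p hc
      rw [hq]

-- B's trimmed-and-joined tail, used as the loop invariant's right-hand side
def joinRest (sep : List Char) : List (List Char) → List Char
  | [] => []
  | [q] => sep ++ ['\n', '\n'] ++ pvLstrip q
  | q :: qs => sep ++ ['\n', '\n'] ++ pvStrip q ++ joinRest sep qs

def tailB (sep l : List Char) : List Char :=
  match splitRef sep l with
  | [] => []
  | [p] => p
  | p :: ps => pvRstrip p ++ joinRest sep ps

theorem go_eq (sep : List Char) (hs : sep ≠ []) (hw : sep.headI ∉ pvWS) :
    ∀ n l, l.length ≤ n → ∀ ret, rmchrGo sep ret l = ret ++ tailB sep l := by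
  intro n
  induction n with
  | zero =>
    intro l hl ret
    have hnil : l = [] := by cases l <;> simp_all
    subst hnil
    rw [rmchrGo]
    simp [pvPart, tailB, splitRef_nil]
  | succ n ih =>
    intro l hl ret
    rw [rmchrGo]
    by_cases hm : (pvPart sep l).2.1 = []
    · simp only [hm, ne_eq, not_true_eq_false, dite_false, not_not]
      unfold tailB
      rw [splitRef_of_mid_nil sep l hs hm]
    · simp only [ne_eq, hm, not_false_iff, dite_true]
      have hmid : (pvPart sep l).2.1 = sep := (pvPart_mid sep l).resolve_left hm
      have hlen : (pvLstrip (pvPart sep l).2.2).length ≤ n := by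
        have h1 := List.length_dropWhile_le (fun c => pvWS.contains c) (pvPart sep l).2.2
        have h2 := pvPart_lt sep l hm
        simp [pvLstrip] at h1 ⊢
        omega
      rw [ih _ hlen]
      obtain ⟨q, qs, hsp⟩ : ∃ q qs, splitRef sep (pvPart sep l).2.2 = q :: qs := by
        cases hx : splitRef sep (pvPart sep l).2.2 with
        | nil => exact absurd hx (splitRef_ne_nil _ _)
        | cons q qs => exact ⟨q, qs, rfl⟩
      have hls := splitRef_lstrip sep hs hw _ q qs hsp
      conv_rhs => unfold tailB
      rw [splitRef_of_mid_ne sep l hs hm, hsp]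
      cases qs with
      | nil =>
        unfold tailB
        rw [hls]
        simp [joinRest, hmid]
      | cons q' qs' =>
        unfold tailB
        rw [hls]
        simp [joinRest, pvStrip, hmid]

theorem join_trim (sep : List Char) :
    ∀ (qs : List (List Char)) (x : List Char), qs ≠ [] →
      PySem.Chars.join (sep ++ ['\n', '\n'])
        (x :: (qs.dropLast.map pvStrip ++ [pvLstrip (qs.getLastD [])])) =
      x ++ joinRest sep qs := by
  intro qs
  induction qs with
  | nil => intro x h; exact absurd rfl h
  | cons q qs ih =>
    intro x _
    cases qs with
    | nil =>
      simp [PySem.Chars.join_cons_cons, PySem.Chars.join_singleton, joinRest]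
    | cons q' qs' =>
      have hd : (q :: q' :: qs').dropLast = q :: (q' :: qs').dropLast := by simp
      have hg : (q :: q' :: qs').getLastD [] = (q' :: qs').getLastD [] := by
        simp [List.getLastD_cons]
      rw [hd, hg]
      simp only [List.map_cons, List.cons_append]
      rw [PySem.Chars.join_cons_cons]
      rw [ih (pvStrip q) (by simp)]
      simp [joinRest]

-- ===== VERDICT (by name: the statement is the Claim_ definition above) =====
theorem rmchr_spec : Claim_equal_rmchr := by
  intro txt char _ hpre
  obtain ⟨hs, hw⟩ := hpre
  unfold Spec_rmchr rmchr rmchr_alt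
  rw [go_eq char.toList hs hw txt.toList.length txt.toList le_rfl []]
  rw [splitOn_eq char.toList txt.toList hs]
  unfold tailB
  cases hsp : splitRef char.toList txt.toList with
  | nil => exact absurd hsp (splitRef_ne_nil _ _)
  | cons p ps =>
    cases ps with
    | nil =>
      have hp := splitRef_single char.toList txt.toList p hs hsp
      rw [hp]; exact String.ofList_toList
    | cons q rest =>
      simp only [List.nil_append]
      rw [join_trim char.toList (q :: rest) (pvRstrip p) (by simp)]
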